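-- pv_equiv track=rewrite | github.com/fatihkutuk/Envest-Mcp-Server | mcps/scada/src/scada_mcp/dma_demand.py | _hour_ranges_tr
-- ===== SOURCE A (Python) =====
-- def _hour_ranges_tr(hours: list[int]) -> str:
--     """[0,1,2,5,6] → 00:00–02:59, 05:00–06:59"""
--     if not hours:
--         return "—"
--     hs = sorted(set(int(h) for h in hours))
--     segs: list[tuple[int, int]] = []
--     a = b = hs[0]
--     for x in hs[1:]:
--         if x == b + 1:
--             b = x
--         else:
--             segs.append((a, b))
--             a = b = x
--     segs.append((a, b))
--     parts: list[str] = []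
--     for a, b in segs:
--         if a == b:
--             parts.append(f"{a:02d}:00")
--         else:
--             parts.append(f"{a:02d}:00–{b:02d}:59")
--     return ", ".join(parts)
-- ===== SOURCE B (Python) =====
-- def _hour_ranges_tr(hours: list[int]) -> str:
--     """[0,1,2,5,6] → 00:00–02:59, 05:00–06:59.
--     Boundary detection: h starts a run iff h-1 is not in the set, ends one iff
--     h+1 is not; zipping the sorted starts with the sorted ends yields the
--     segments — no sequential adjacency state machine at all."""
--     if not hours:
--         return "—"
--     s = {int(h) for h in hours}
--     hs = sorted(s)
--     starts = [h for h in hs if h - 1 not in s]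
--     ends = [h for h in hs if h + 1 not in s]
--     return ", ".join(
--         f"{a:02d}:00" if a == b else f"{a:02d}:00–{b:02d}:59"
--         for a, b in zip(starts, ends)
--     )
-- ===== Notes on version B (the rewrite author's own statement) =====
-- stated objective: alternative
-- what changed: B finds each run by set-membership boundary tests (h is a run start iff h-1 is absent, a run end iff h+1 is absent) and zips the start list with the end list, instead of A's sequential merge loop carrying (a,b) run state over adjacent elements.
import Mathlib
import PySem

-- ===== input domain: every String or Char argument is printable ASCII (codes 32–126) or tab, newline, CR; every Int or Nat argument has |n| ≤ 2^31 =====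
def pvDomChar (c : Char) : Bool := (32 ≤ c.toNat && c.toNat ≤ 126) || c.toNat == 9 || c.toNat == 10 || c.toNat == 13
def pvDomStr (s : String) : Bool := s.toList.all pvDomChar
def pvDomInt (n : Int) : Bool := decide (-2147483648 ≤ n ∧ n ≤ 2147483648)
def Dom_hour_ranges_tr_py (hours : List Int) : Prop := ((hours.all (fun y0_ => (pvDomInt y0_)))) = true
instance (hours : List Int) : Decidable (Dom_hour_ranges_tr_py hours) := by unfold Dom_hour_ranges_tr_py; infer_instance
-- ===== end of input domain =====

-- B replaces A's sequential merge loop (scalar (a,b) run state over adjacent elements) by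
-- set-membership boundary detection: run starts are hours whose predecessor is absent, run
-- ends hours whose successor is absent, zipped together (objective: alternative).

-- shared helper: f"{n:02d}" = str(n) left-padded with '0' to width 2; zfill pads after the sign, exactly Python's 0-pad for ints
def pvFmt02 (n : Int) : String := PySem.Str.zfill (PySem.Int.toStr n) 2

-- ===== PORT A =====

-- loop body of A's merge loop: state (segs, a, b)
def pvStepA (st : List (Int × Int) × Int × Int) (x : Int) : List (Int × Int) × Int × Int :=
  if x = st.2.2 + 1 then (st.1, st.2.1, x)
  else (st.1 ++ [(st.2.1, st.2.2)], x, x)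

def hour_ranges_tr_py (hours : List Int) : String :=
  if hours = [] then "—"
  else
    let hs := PySem.List.sorted (PySem.Set.ofList hours) (fun h => h) false
    match hs with
    | [] => "—"  -- unreachable: sorted(set(hours)) is empty only when hours is
    | h0 :: tl =>
      let st := tl.foldl pvStepA ([], h0, h0)
      let segs := st.1 ++ [(st.2.1, st.2.2)]
      let parts := segs.foldl
        (fun parts ab =>
          if ab.1 = ab.2 then parts ++ [pvFmt02 ab.1 ++ ":00"]
          else parts ++ [pvFmt02 ab.1 ++ ":00–" ++ pvFmt02 ab.2 ++ ":59"])
        ([] : List String)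
      PySem.Str.join ", " parts

-- ===== PORT B =====
-- the conditional expression of B's joined comprehension
def pvFmtSegB (ab : Int × Int) : String :=
  if ab.1 = ab.2 then pvFmt02 ab.1 ++ ":00"
  else pvFmt02 ab.1 ++ ":00–" ++ pvFmt02 ab.2 ++ ":59"

def hour_ranges_tr_py_alt (hours : List Int) : String :=
  if hours = [] then "—"
  else
    let s := PySem.Set.ofList hours
    let hs := PySem.List.sorted s (fun h => h) false
    let starts := hs.filter (fun h => !(PySem.Set.contains s (h - 1)))
    let ends := hs.filter (fun h => !(PySem.Set.contains s (h + 1)))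
    PySem.Str.join ", " ((starts.zip ends).map pvFmtSegB)

-- ===== PRECONDITION & SPEC =====
def Spec_hour_ranges_tr_py (hours : List Int) (out : String) : Prop := out = hour_ranges_tr_py_alt hours
instance (hours : List Int) (out : String) : Decidable (Spec_hour_ranges_tr_py hours out) := by unfold Spec_hour_ranges_tr_py; infer_instance

-- ===== CLAIM =====
def Claim_equal_hour_ranges_tr_py : Prop := ∀ (hours : List Int), Dom_hour_ranges_tr_py hours → Spec_hour_ranges_tr_py hours (hour_ranges_tr_py hours)

-- ===== LEMMAS AND PROOFS =====

-- the canonical run decomposition both programs compute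
def pvRuns (a b : Int) : List Int → List (Int × Int)
  | [] => [(a, b)]
  | x :: xs => if x = b + 1 then pvRuns a x xs else (a, b) :: pvRuns x x xs

lemma pvRuns_first (xs : List Int) : ∀ (b : Int), ∃ e r, ∀ a, pvRuns a b xs = (a, e) :: r := by
  induction xs with
  | nil => intro b; exact ⟨b, [], fun a => rfl⟩
  | cons x xs ih =>
    intro b
    by_cases h : x = b + 1
    · subst h
      obtain ⟨e, r, hf⟩ := ih (b + 1)
      exact ⟨e, r, fun a => by rw [pvRuns, if_pos rfl]; exact hf a⟩
    · exact ⟨b, pvRuns x x xs, fun a => by rw [pvRuns, if_neg h]⟩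

lemma pvNotDec {p q : Prop} [Decidable p] [Decidable q] (h : p ↔ q) :
    (!decide p) = !decide q := by simp [h]

lemma pvZip_eq (tl : List Int) : ∀ (h0 : Int), (h0 :: tl).Pairwise (· < ·) →
    ((h0 :: tl).filter (fun h => !((h0 :: tl).contains (h - 1)))).zip
      ((h0 :: tl).filter (fun h => !((h0 :: tl).contains (h + 1))))
      = pvRuns h0 h0 tl := by
  induction tl with
  | nil =>
    intro h0 _
    simp [pvRuns, List.filter]
  | cons h1 rest ih =>
    intro h0 hpw
    have h01 : h0 < h1 := (List.pairwise_cons.1 hpw).1 h1 List.mem_cons_self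
    have h0rest : ∀ y ∈ rest, h0 < y := fun y hy =>
      (List.pairwise_cons.1 hpw).1 y (List.mem_cons_of_mem _ hy)
    have hpw' : (h1 :: rest).Pairwise (· < ·) := (List.pairwise_cons.1 hpw).2
    have h1rest : ∀ y ∈ rest, h1 < y := fun y hy => (List.pairwise_cons.1 hpw').1 y hy
    have hcontains : ∀ (L : List Int) (x : Int), L.contains x = decide (x ∈ L) := by
      intro L x; simp
    have p0 : (!((h0 :: h1 :: rest).contains (h0 - 1))) = true := by
      simp only [hcontains, Bool.not_eq_true', decide_eq_false_iff_not, List.mem_cons, not_or]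
      exact ⟨by omega, by omega, fun hm => by have := h0rest _ hm; omega⟩
    have qtail : ∀ y ∈ h1 :: rest,
        (!((h0 :: h1 :: rest).contains (y + 1))) = (!((h1 :: rest).contains (y + 1))) := by
      intro y hy
      have hy2 : h0 < y := by
        rcases List.mem_cons.1 hy with h | h
        · omega
        · exact h0rest _ h
      simp only [hcontains]
      apply pvNotDec
      simp only [List.mem_cons]
      constructor
      · rintro (h | h) <;> [omega; exact h]
      · exact Or.inr
    by_cases hc : h1 = h0 + 1
    · have p1 : (!((h0 :: h1 :: rest).contains (h1 - 1))) = false := by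
        simp only [hcontains, Bool.not_eq_false', decide_eq_true_eq, List.mem_cons]
        left; omega
      have ptail : ∀ y ∈ rest,
          (!((h0 :: h1 :: rest).contains (y - 1))) = (!((h1 :: rest).contains (y - 1))) := by
        intro y hy
        have hy2 := h1rest y hy
        simp only [hcontains]
        apply pvNotDec
        simp only [List.mem_cons]
        constructor
        · rintro (h | h) <;> [omega; exact h]
        · exact Or.inr
      have q0 : (!((h0 :: h1 :: rest).contains (h0 + 1))) = false := by
        simp only [hcontains, Bool.not_eq_false', decide_eq_true_eq, List.mem_cons]
        right; left; omega
      have hstarts : (h0 :: h1 :: rest).filter (fun h => !((h0 :: h1 :: rest).contains (h - 1)))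
          = h0 :: rest.filter (fun h => !((h1 :: rest).contains (h - 1))) := by
        rw [List.filter_cons, List.filter_cons]
        simp only [p0, p1, if_true]
        congr 1
        exact List.filter_congr ptail
      have hends : (h0 :: h1 :: rest).filter (fun h => !((h0 :: h1 :: rest).contains (h + 1)))
          = (h1 :: rest).filter (fun h => !((h1 :: rest).contains (h + 1))) := by
        rw [List.filter_cons]
        simp only [q0]
        exact List.filter_congr qtail
      have hp1T : (!((h1 :: rest).contains (h1 - 1))) = true := by
        simp only [hcontains, Bool.not_eq_true', decide_eq_false_iff_not, List.mem_cons, not_or]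
        exact ⟨by omega, fun hm => by have := h1rest _ hm; omega⟩
      have hIH := ih h1 hpw'
      rw [List.filter_cons, hp1T, if_pos rfl] at hIH
      obtain ⟨e, r, hf⟩ := pvRuns_first rest h1
      rw [hf h1] at hIH
      rcases hE : (h1 :: rest).filter (fun h => !((h1 :: rest).contains (h + 1))) with _ | ⟨e1, E'⟩
      · rw [hE] at hIH; simp at hIH
      · rw [hE] at hIH
        rw [List.zip_cons_cons] at hIH
        have he1 : e1 = e := by
          have := congrArg (fun l => l.head?) hIH
          simp at this
          exact this
        have hzr : (rest.filter (fun h => !((h1 :: rest).contains (h - 1)))).zip E' = r := by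
          have := congrArg (fun l => l.tail) hIH
          simpa using this
        rw [hstarts, hends, hE, List.zip_cons_cons, he1, hzr]
        rw [pvRuns, if_pos hc, hf h0]
    · have ptail : ∀ y ∈ h1 :: rest,
          (!((h0 :: h1 :: rest).contains (y - 1))) = (!((h1 :: rest).contains (y - 1))) := by
        intro y hy
        have hy2 : h1 ≤ y := by
          rcases List.mem_cons.1 hy with h | h
          · omega
          · have := h1rest _ h; omega
        simp only [hcontains]
        apply pvNotDec
        simp only [List.mem_cons]
        constructor
        · rintro (h | h)
          · exact absurd h (by omega)
          · exact h
        · exact Or.inr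
      have q0 : (!((h0 :: h1 :: rest).contains (h0 + 1))) = true := by
        simp only [hcontains, Bool.not_eq_true', decide_eq_false_iff_not, List.mem_cons, not_or]
        exact ⟨by omega, by omega, fun hm => by have := h1rest _ hm; omega⟩
      have hstarts : (h0 :: h1 :: rest).filter (fun h => !((h0 :: h1 :: rest).contains (h - 1)))
          = h0 :: (h1 :: rest).filter (fun h => !((h1 :: rest).contains (h - 1))) := by
        rw [List.filter_cons]
        simp only [p0, if_true]
        congr 1
        exact List.filter_congr ptail
      have hends : (h0 :: h1 :: rest).filter (fun h => !((h0 :: h1 :: rest).contains (h + 1)))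
          = h0 :: (h1 :: rest).filter (fun h => !((h1 :: rest).contains (h + 1))) := by
        rw [List.filter_cons]
        simp only [q0, if_true]
        congr 1
        exact List.filter_congr qtail
      rw [hstarts, hends, List.zip_cons_cons, ih h1 hpw']
      rw [pvRuns, if_neg hc]

-- A's fold produces exactly pvRuns
lemma pvFoldA_eq (xs : List Int) : ∀ (s : List (Int × Int)) (a b : Int),
    (xs.foldl pvStepA (s, a, b)).1 ++
      [((xs.foldl pvStepA (s, a, b)).2.1, (xs.foldl pvStepA (s, a, b)).2.2)]
      = s ++ pvRuns a b xs := by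
  induction xs with
  | nil => intro s a b; simp [pvRuns]
  | cons x xs ih =>
    intro s a b
    by_cases h : x = b + 1 <;>
      simp [pvStepA, pvRuns, h, ih]

-- A's formatting fold is a map over pvFmtSegB
lemma pvParts_eq (segs : List (Int × Int)) (acc : List String) :
    segs.foldl
      (fun parts ab =>
        if ab.1 = ab.2 then parts ++ [pvFmt02 ab.1 ++ ":00"]
        else parts ++ [pvFmt02 ab.1 ++ ":00–" ++ pvFmt02 ab.2 ++ ":59"]) acc
      = acc ++ segs.map pvFmtSegB := by
  induction segs generalizing acc with
  | nil => simp
  | cons ab segs ih =>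
    simp only [List.foldl_cons, List.map_cons]
    have hb : (if ab.1 = ab.2 then acc ++ [pvFmt02 ab.1 ++ ":00"]
        else acc ++ [pvFmt02 ab.1 ++ ":00–" ++ pvFmt02 ab.2 ++ ":59"])
        = acc ++ [pvFmtSegB ab] := by
      unfold pvFmtSegB
      split_ifs <;> rfl
    rw [hb, ih]
    simp

-- ===== VERDICT =====
theorem hour_ranges_tr_py_spec : Claim_equal_hour_ranges_tr_py := by
  intro hours _
  unfold Spec_hour_ranges_tr_py hour_ranges_tr_py hour_ranges_tr_py_alt
  by_cases hne : hours = []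
  · simp [hne]
  · simp only [hne, if_false]
    rcases hhs : PySem.List.sorted (PySem.Set.ofList hours) (fun h => h) false with _ | ⟨h0, tl⟩
    · exfalso
      rw [PySem.List.sorted_eq_nil_iff] at hhs
      rcases hours with _ | ⟨h, t⟩
      · exact hne rfl
      · have : h ∈ PySem.Set.ofList (h :: t) := by
          rw [PySem.Set.mem_ofList]; exact List.mem_cons_self
        rw [hhs] at this; simp at this
    · -- replace the Set.contains queries by contains on the sorted list (a permutation of the set)
      have hperm : (h0 :: tl).Perm (PySem.Set.ofList hours) := by
        rw [← hhs]; exact PySem.List.sorted_perm _ _ _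
      have hmem : ∀ x : Int, (PySem.Set.contains (PySem.Set.ofList hours) x)
          = (h0 :: tl).contains x := by
        intro x
        have hc : ∀ (L : List Int) (y : Int), L.contains y = decide (y ∈ L) := by
          intro L y; simp
        rw [PySem.Set.contains_eq_listContains, hc, hc, decide_eq_decide]
        exact hperm.mem_iff.symm
      have hpw : (h0 :: tl).Pairwise (· < ·) := by
        rw [← hhs]; exact PySem.List.sorted_ofList_pairwise_lt hours
      have hfilt1 : (h0 :: tl).filter (fun h => !(PySem.Set.contains (PySem.Set.ofList hours) (h - 1)))
          = (h0 :: tl).filter (fun h => !((h0 :: tl).contains (h - 1))) := by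
        apply List.filter_congr; intro y _; rw [hmem]
      have hfilt2 : (h0 :: tl).filter (fun h => !(PySem.Set.contains (PySem.Set.ofList hours) (h + 1)))
          = (h0 :: tl).filter (fun h => !((h0 :: tl).contains (h + 1))) := by
        apply List.filter_congr; intro y _; rw [hmem]
      simp only [hfilt1, hfilt2, pvZip_eq tl h0 hpw]
      have hA := pvFoldA_eq tl [] h0 h0
      simp only [List.nil_append] at hA
      rw [hA, pvParts_eq]
      simp
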